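-- pv_equiv track=rewrite | github.com/supremejohnny/algo_learning | move_GorB_tosides/move_to_LorR.py | move_char
-- ===== SOURCE A (Python) =====
-- def move_char(strr):
--     # 计算移动G的最少次数
--     ans = 0
--
--     # 这一整步是为了找到G的出现位置并打点
--     str_aux = [0] * len(strr)
--     cnt = 0
--     while cnt < len(strr):
--         if strr[cnt] == "G":
--             tmp = cnt + 1
--             str_aux[cnt] = tmp
--         cnt += 1
--
--     # 因为G的位置打过点了，那B是str_aux里面的0，其余的便为G
--     b_show = str_aux.count(0)
--     g_show = len(strr) - str_aux.count(0)
--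
--     # 为了对位相减，把所有的不相关内容删除(删掉0)
--     n = 0
--     while n < b_show:
--         str_aux.remove(0)
--         n += 1
--
--     # pyhton不能list - list，所以写一个forloop对位相减
--     for ele in range(0, g_show):
--         ans += (str_aux[ele] - ele - 1)
--
--     # 这一步开始计算B的最少移动次数
--     ans2 = 0
--
--     str_aux2 = [0] * len(strr)
--     cnt2 = 0
--     while cnt2 < len(strr):
--         if strr[cnt2] == "B":
--             tmp = cnt2 + 1
--             str_aux2[cnt2] = tmp
--         cnt2 += 1
--
--     g_show2 = str_aux2.count(0)
--     b_show2 = len(strr) - str_aux2.count(0)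
--
--     n2 = 0
--     while n2 < g_show2:
--         str_aux2.remove(0)
--         n2 += 1
--
--     for ele2 in range(0, b_show2):
--         ans2 += (str_aux2[ele2] - ele2 - 1)
--
--     # 最后带一次对比，判断哪种情况可以更好的fit
--     if ans > ans2:
--         return (ans2, "B")
--     else:
--         return (ans, "G")
-- ===== SOURCE B (Python) =====
-- def move_char(strr):
--     # single pass: each target character at index i with rank r among its kind
--     # contributes i - r to its side's gathering cost
--     ansG = ansB = 0
--     g = b = 0
--     for i, ch in enumerate(strr):
--         if ch == "G":
--             ansG += i - g
--             g += 1
--         elif ch == "B":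
--             ansB += i - b
--             b += 1
--     if ansG > ansB:
--         return (ansB, "B")
--     return (ansG, "G")
-- ===== Notes on version B (the rewrite author's own statement) =====
-- stated objective: faster
-- what changed: Replaced A's two marker-array / repeatedly-remove-zeros (list.remove is linear, called once per non-target position) / index-subtract passes with one linear pass that accumulates position-minus-rank for both target characters simultaneously.
import Mathlib
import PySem

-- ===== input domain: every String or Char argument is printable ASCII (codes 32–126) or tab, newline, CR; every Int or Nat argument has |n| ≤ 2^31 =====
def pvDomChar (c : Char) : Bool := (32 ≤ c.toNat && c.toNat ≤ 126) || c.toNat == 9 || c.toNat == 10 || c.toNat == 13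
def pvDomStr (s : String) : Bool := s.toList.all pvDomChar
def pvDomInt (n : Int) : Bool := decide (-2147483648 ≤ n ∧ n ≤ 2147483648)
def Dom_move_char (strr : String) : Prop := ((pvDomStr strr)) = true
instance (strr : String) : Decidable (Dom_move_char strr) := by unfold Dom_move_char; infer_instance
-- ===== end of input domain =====

-- B replaces A's marker-array + repeated list.remove(0) + indexed-subtraction passes (run twice)
-- by one linear pass accumulating position-minus-rank for both target characters; objective: faster.


-- ===== PORT A =====
-- A's 'while n < b_show: str_aux.remove(0)': remove(0) always succeeds here (the loop runs
-- exactly count-of-0 times), so the .getD fallback is never reached.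
def removeZeros : Nat → List Int → List Int
  | 0, l => l
  | n + 1, l => removeZeros n ((PySem.List.remove? l 0).getD l)

def move_char (strr : String) : Int × String :=
  let cs := strr.toList
  -- while cnt < len(strr): if strr[cnt] == 'G': str_aux[cnt] = cnt + 1  (array starts all 0)
  let str_aux := (PySem.List.enumerate cs).map (fun p => if p.2 == 'G' then p.1 + 1 else (0 : Int))
  let b_show : Nat := str_aux.count 0
  let g_show : Int := (cs.length : Int) - (str_aux.count 0 : Int)
  let str_aux := removeZeros b_show str_aux
  -- for ele in range(0, g_show): ans += str_aux[ele] - ele - 1  (index always in range here)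
  let ans := (PySem.List.pyRange 0 g_show 1).foldl
    (fun a ele => a + (PySem.List.pyGetD str_aux ele 0 - ele - 1)) 0
  let str_aux2 := (PySem.List.enumerate cs).map (fun p => if p.2 == 'B' then p.1 + 1 else (0 : Int))
  let g_show2 : Nat := str_aux2.count 0
  let b_show2 : Int := (cs.length : Int) - (str_aux2.count 0 : Int)
  let str_aux2 := removeZeros g_show2 str_aux2
  let ans2 := (PySem.List.pyRange 0 b_show2 1).foldl
    (fun a ele => a + (PySem.List.pyGetD str_aux2 ele 0 - ele - 1)) 0
  if ans > ans2 then (ans2, "B") else (ans, "G")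

-- ===== PORT B =====
-- state: (ansG, ansB, g, b)
def altStep (st : Int × Int × Int × Int) (p : Int × Char) : Int × Int × Int × Int :=
  if p.2 == 'G' then (st.1 + p.1 - st.2.2.1, st.2.1, st.2.2.1 + 1, st.2.2.2)
  else if p.2 == 'B' then (st.1, st.2.1 + p.1 - st.2.2.2, st.2.2.1, st.2.2.2 + 1)
  else st

def move_char_alt (strr : String) : Int × String :=
  let s := (PySem.List.enumerate strr.toList).foldl altStep (0, 0, 0, 0)
  if s.1 > s.2.1 then (s.2.1, "B") else (s.1, "G")

-- ===== PRECONDITION & SPEC =====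
def Spec_move_char (strr : String) (out : Int × String) : Prop := out = move_char_alt strr
instance (strr : String) (out : Int × String) : Decidable (Spec_move_char strr out) := by unfold Spec_move_char; infer_instance

-- ===== CLAIM (what is proved, stated in full; the proofs are below) =====
def Claim_equal_move_char : Prop := ∀ (strr : String), Dom_move_char strr → Spec_move_char strr (move_char strr)

-- ===== LEMMAS AND PROOFS =====

-- indices (in order) at which c occurs, enumeration starting at i
def posList (cs : List Char) (c : Char) (i : Int) : List Int :=
  ((PySem.List.enumerate cs i).filter (fun p => p.2 == c)).map (·.1)

-- Σ_j (p_j - (k + j))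
def rankSum : List Int → Int → Int
  | [], _ => 0
  | p :: t, k => (p - k) + rankSum t (k + 1)

lemma posList_nil (c : Char) (i : Int) : posList [] c i = [] := by
  simp [posList, PySem.List.enumerate_nil]

lemma posList_cons (ch : Char) (cs : List Char) (c : Char) (i : Int) :
    posList (ch :: cs) c i =
      (if ch == c then [i] else []) ++ posList cs c (i + 1) := by
  simp only [posList, PySem.List.enumerate_cons, List.filter_cons]
  by_cases h : ch == c <;> simp [h]

-- B-side: the fold computes both rank sums at once
lemma altFold (cs : List Char) : ∀ (i aG aB g b : Int),
    (PySem.List.enumerate cs i).foldl altStep (aG, aB, g, b) =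
      (aG + rankSum (posList cs 'G' i) g, aB + rankSum (posList cs 'B' i) b,
       g + (posList cs 'G' i).length, b + (posList cs 'B' i).length) := by
  induction cs with
  | nil => intro i aG aB g b; simp [PySem.List.enumerate_nil, posList_nil, rankSum]
  | cons ch t ih =>
    intro i aG aB g b
    simp only [PySem.List.enumerate_cons, List.foldl_cons, posList_cons]
    by_cases hG : ch == 'G'
    · have hch : ch = 'G' := by simpa using hG
      have hB : (ch == 'B') = false := by simp [hch]
      simp [altStep, hG, hB, ih, rankSum]
      and_intros <;> ring
    · by_cases hB : ch == 'B'
      · simp [altStep, hG, hB, ih, rankSum]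
        and_intros <;> ring
      · simp [altStep, hG, hB, ih]

-- A-side (1): removing first-0 count-many times is filtering the zeros out
lemma removeZeros_cons_ne (a : Int) (ha : a ≠ 0) :
    ∀ (n : Nat) (l : List Int), n ≤ l.count 0 →
      removeZeros n (a :: l) = a :: removeZeros n l := by
  intro n
  induction n with
  | zero => intro l _; rfl
  | succ m ih =>
    intro l hn
    have h0 : (0 : Int) ∈ l := by
      by_contra h
      simp [List.count_eq_zero_of_not_mem h] at hn
    have hrem : PySem.List.remove? l 0 = some (l.erase 0) :=
      PySem.List.remove?_eq_some_erase l 0 h0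
    have hrema : PySem.List.remove? (a :: l) 0 = some (a :: l.erase 0) := by
      rw [PySem.List.remove?_cons_of_ne l ha, hrem]; rfl
    have hcnt : m ≤ (l.erase 0).count 0 := by
      rw [List.count_erase_self]
      omega
    simp only [removeZeros, hrema, hrem, Option.getD_some]
    exact ih (l.erase 0) hcnt

lemma removeZeros_count (l : List Int) :
    removeZeros (l.count 0) l = l.filter (fun x => x != 0) := by
  induction l with
  | nil => rfl
  | cons a t ih =>
    by_cases ha : a = 0
    · subst ha
      have : (0 : Int) :: t = (0 : Int) :: t := rfl
      simp only [List.count_cons_self, removeZeros, PySem.List.remove?_cons_self,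
        Option.getD_some, List.filter_cons]
      simpa using ih
    · rw [List.count_cons_of_ne (by simpa using ha),
        removeZeros_cons_ne a ha _ t le_rfl, ih, List.filter_cons]
      simp [ha]

-- A-side (2): the marker array, zeros filtered out, is the c-positions shifted by +1
lemma mark_filter (c : Char) (cs : List Char) : ∀ (i : Int), 0 ≤ i →
    ((PySem.List.enumerate cs i).map
        (fun p => if p.2 == c then p.1 + 1 else (0 : Int))).filter (fun x => x != 0) =
      (posList cs c i).map (· + 1) := by
  induction cs with
  | nil => intro i _; simp [PySem.List.enumerate_nil, posList_nil]
  | cons ch t ih =>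
    intro i hi
    simp only [PySem.List.enumerate_cons, List.map_cons, List.filter_cons, posList_cons]
    rw [ih (i + 1) (by omega)]
    by_cases h : ch == c
    · have hne : (i + 1 : Int) ≠ 0 := by omega
      simp [h, hne]
    · simp [h]

-- A-side (3): the count of zero markers complements the number of c-positions
lemma mark_count (c : Char) (cs : List Char) : ∀ (i : Int), 0 ≤ i →
    ((PySem.List.enumerate cs i).map
        (fun p => if p.2 == c then p.1 + 1 else (0 : Int))).count 0 =
      cs.length - (posList cs c i).length ∧
    (posList cs c i).length ≤ cs.length := by
  induction cs with
  | nil => intro i _; simp [PySem.List.enumerate_nil, posList_nil]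
  | cons ch t ih =>
    intro i hi
    obtain ⟨h1, h2⟩ := ih (i + 1) (by omega)
    simp only [PySem.List.enumerate_cons, List.map_cons, posList_cons, List.length_cons]
    refine ⟨?_, ?_⟩
    · by_cases h : ch == c
      · have hx : (if (ch == c) = true then i + 1 else (0 : Int)) ≠ 0 := by simp [h]; omega
        rw [List.count_cons_of_ne hx, h1]
        simp [h]
      · have hx : (if (ch == c) = true then i + 1 else (0 : Int)) = 0 := by simp [h]
        rw [hx, List.count_cons_self, h1]
        simp [h]
        omega
    · by_cases h : ch == c
      · simp [h]
        omega
      · simp [h]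
        omega

-- A-side (4)+(5): the indexed subtraction loop over q = P.map(+1) is rankSum P
lemma enumFold_ranks (P : List Int) : ∀ (k acc : Int),
    (PySem.List.enumerate (P.map (· + 1)) k).foldl
        (fun a p => a + (p.2 - p.1 - 1)) acc = acc + rankSum P k := by
  induction P with
  | nil => intro k acc; simp [PySem.List.enumerate_nil, rankSum]
  | cons p t ih =>
    intro k acc
    simp only [List.map_cons, PySem.List.enumerate_cons, List.foldl_cons, rankSum, ih]
    ring

-- one half of A computes rankSum (posList cs c 0) 0
lemma ansA_eq (c : Char) (cs : List Char) :
    (PySem.List.pyRange 0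
        ((cs.length : Int) -
          (((PySem.List.enumerate cs).map
              (fun p => if p.2 == c then p.1 + 1 else (0 : Int))).count 0 : Int)) 1).foldl
      (fun a ele => a +
        (PySem.List.pyGetD
            (removeZeros
              (((PySem.List.enumerate cs).map
                  (fun p => if p.2 == c then p.1 + 1 else (0 : Int))).count 0)
              ((PySem.List.enumerate cs).map
                (fun p => if p.2 == c then p.1 + 1 else (0 : Int)))) ele 0 - ele - 1)) 0
      = rankSum (posList cs c 0) 0 := by
  set mark := (PySem.List.enumerate cs).map
      (fun p => if p.2 == c then p.1 + 1 else (0 : Int)) with hmark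
  have hfil : mark.filter (fun x => x != 0) = (posList cs c 0).map (· + 1) :=
    mark_filter c cs 0 le_rfl
  obtain ⟨hc, hle⟩ := mark_count c cs 0 le_rfl
  set q := (posList cs c 0).map (· + 1) with hq
  have hrm : removeZeros (mark.count 0) mark = q := by
    rw [removeZeros_count, hfil]
  have hlen : (cs.length : Int) - (mark.count 0 : Int) = (q.length : Int) := by
    rw [hc]
    simp [hq]
    omega
  rw [hrm, hlen]
  have hme := PySem.List.enumerate_eq_map_pyRange (d := 0) (xs := q)
  have hfold :
      (PySem.List.pyRange 0 (PySem.List.len q) 1).foldl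
          (fun a ele => a + (PySem.List.pyGetD q ele 0 - ele - 1)) 0
        = (PySem.List.enumerate q 0).foldl (fun a p => a + (p.2 - p.1 - 1)) 0 := by
    rw [hme, List.foldl_map]
  have hlq : (PySem.List.len q) = (q.length : Int) := by
    simp [PySem.List.len_eq]
  rw [← hlq, hfold, hq, enumFold_ranks]
  ring

-- ===== VERDICT (by name: the statement is the Claim_ definition above) =====
theorem move_char_spec : Claim_equal_move_char := by
  intro strr _
  unfold Spec_move_char move_char move_char_alt
  simp only []
  rw [ansA_eq 'G' strr.toList, ansA_eq 'B' strr.toList,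
    altFold strr.toList 0 0 0 0 0]
  simp
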